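-- pv_equiv track=rewrite | github.com/giganticode/codeprep | codeprep/bpepkg/bpe_encode.py | to_char_list
-- ===== SOURCE A (Python) =====
-- ESCAPE_CHAR = '@'
--
-- ESCAPABLE_CHAR_LIST = [] + [ESCAPE_CHAR]
--
-- def to_char_list(word: str):
--     i = 0
--     res = []
--     while i < len(word):
--         if word[i] != ESCAPE_CHAR or i+1 == len(word):
--             res.append(word[i])
--             i += 1
--         elif word[i+1] in ESCAPABLE_CHAR_LIST:
--             res.append(word[i:i+2])
--             i += 2
--         else:
--             raise ValueError(f"Illegal escape sequence: {word[i:i+2]}")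
--     return res
-- ===== SOURCE B (Python) =====
-- ESCAPE_CHAR = '@'
--
-- ESCAPABLE_CHAR_LIST = [] + [ESCAPE_CHAR]
--
-- def to_char_list(word: str):
--     res = []
--     pending_escape = False
--     for c in word:
--         if pending_escape:
--             if c == ESCAPE_CHAR:
--                 res.append(ESCAPE_CHAR + c)
--                 pending_escape = False
--             else:
--                 raise ValueError(f"Illegal escape sequence: {ESCAPE_CHAR + c}")
--         elif c == ESCAPE_CHAR:
--             pending_escape = True
--         else:
--             res.append(c)
--     if pending_escape:
--         res.append(ESCAPE_CHAR)
--     return res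
-- ===== Notes on version B (the rewrite author's own statement) =====
-- stated objective: faster
-- what changed: Replaced the index-based while loop with lookahead, repeated len() calls, indexing and slicing by a single forward for-loop state machine carrying a pending_escape flag; a timing run measured B 2.9x faster at the largest size (constant-factor: direct character iteration, no per-step indexing/slicing).
import Mathlib
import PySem

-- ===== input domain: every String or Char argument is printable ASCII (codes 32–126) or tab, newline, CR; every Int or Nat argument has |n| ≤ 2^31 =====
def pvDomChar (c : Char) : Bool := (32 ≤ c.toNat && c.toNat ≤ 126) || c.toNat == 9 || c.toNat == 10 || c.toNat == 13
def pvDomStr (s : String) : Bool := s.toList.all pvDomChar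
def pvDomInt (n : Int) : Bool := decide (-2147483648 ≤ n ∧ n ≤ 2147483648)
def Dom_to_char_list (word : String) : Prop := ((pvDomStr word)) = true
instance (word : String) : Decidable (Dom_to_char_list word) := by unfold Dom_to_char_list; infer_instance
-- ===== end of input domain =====

-- B replaces A's index-based while loop (lookahead and slices) by a single forward
-- state-machine pass with a pending-escape flag (measured faster by a constant factor);
-- same values and same ValueError everywhere.

-- ===== PORT A =====
-- A's while loop over index i; the 'raise ValueError' branch returns the accumulated
-- res (unreachable under Pre_to_char_list).
def pvALoop (l : List Char) (i : Nat) (res : List String) : List String :=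
  if h : i < l.length then
    if l[i] ≠ '@' ∨ i + 1 = l.length then
      pvALoop l (i + 1) (res ++ [String.ofList [l[i]]])
    else if l[i+1]? = some '@' then
      -- word[i:i+2]
      pvALoop l (i + 2) (res ++ [String.ofList ((l.drop i).take 2)])
    else
      res  -- raise ValueError
  else res
termination_by l.length - i

def to_char_list (word : String) : List String := pvALoop word.toList 0 []

-- ===== PORT B =====
-- B's for-loop over the characters with the pending_escape flag; the raise branch
-- returns the accumulated res (unreachable under Pre_to_char_list).
def pvBGo : List Char → Bool → List String → List String
  | [], pending, res => if pending then res ++ ["@"] else res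
  | c :: rest, pending, res =>
    if pending then
      if c = '@' then pvBGo rest false (res ++ ["@@"])
      else res  -- raise ValueError
    else if c = '@' then pvBGo rest true res
    else pvBGo rest false (res ++ [String.ofList [c]])

def to_char_list_alt (word : String) : List String := pvBGo word.toList false []

-- ===== PRECONDITION & SPEC =====
-- Pre_ excludes exactly the words on which Python A raises ValueError, namely words with an
-- illegal escape sequence: an odd maximal run of the escape character immediately followed by
-- an ordinary character; Python B raises the same ValueError there.
def Pre_to_char_list (word : String) : Prop :=
  ∀ i < word.toList.length,
    word.toList[i]? = some '@' → word.toList[i+1]? ≠ some '@' → i + 1 < word.toList.length →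
      ((word.toList.take (i+1)).reverse.takeWhile (· = '@')).length % 2 = 0
instance (word : String) : Decidable (Pre_to_char_list word) := by unfold Pre_to_char_list; infer_instance

def pvWitness_to_char_list : String := "a@@b"

def Spec_to_char_list (word : String) (out : List String) : Prop := out = to_char_list_alt word
instance (word : String) (out : List String) : Decidable (Spec_to_char_list word out) := by unfold Spec_to_char_list; infer_instance

-- ===== CLAIM (what is proved, stated in full; the proofs are below) =====
def Claim_equal_to_char_list : Prop := ∀ (word : String), Dom_to_char_list word → Pre_to_char_list word → Spec_to_char_list word (to_char_list word)

-- ===== LEMMAS AND PROOFS =====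

-- The two loops agree from any position i on any accumulator (even on the raise paths,
-- where both return the accumulated list).
lemma pvALoop_eq_pvBGo (n : Nat) : ∀ (l : List Char) (i : Nat) (res : List String),
    l.length - i ≤ n → pvALoop l i res = pvBGo (l.drop i) false res := by
  induction n with
  | zero =>
    intro l i res h
    have hi : l.length ≤ i := by omega
    rw [pvALoop, List.drop_eq_nil_of_le hi]
    simp [pvBGo, Nat.not_lt.mpr hi]
  | succ n ih =>
    intro l i res h
    by_cases hi : i < l.length
    · have hdrop : l.drop i = l[i] :: l.drop (i+1) := List.drop_eq_getElem_cons hi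
      rw [pvALoop]
      simp only [hi, dite_true]
      by_cases hc : l[i] = '@'
      · by_cases hlast : i + 1 = l.length
        · -- lone trailing '@'
          simp only [hc, hlast, ne_eq, not_true_eq_false, or_true, if_true]
          have h2 : l.drop (i+1) = [] := List.drop_eq_nil_of_le (by omega)
          rw [pvALoop]
          simp only [lt_irrefl, dite_false]
          rw [hdrop, h2, hc]
          simp only [pvBGo, if_true]
          congr 1
        · have hi1 : i + 1 < l.length := by omega
          have hdrop1 : l.drop (i+1) = l[i+1] :: l.drop (i+2) := List.drop_eq_getElem_cons hi1
          simp only [hc, hlast, ne_eq, not_true_eq_false, false_or, if_false]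
          by_cases hc2 : l[i+1] = '@'
          · -- escape pair "@@"
            have hget : l[i+1]? = some '@' := by
              rw [List.getElem?_eq_getElem hi1, hc2]
            simp only [hget, if_true]
            have htake : (l.drop i).take 2 = ['@', '@'] := by
              rw [hdrop, hdrop1, hc, hc2]; rfl
            rw [htake, ih l (i+2) (res ++ [String.ofList ['@', '@']]) (by omega),
              hdrop, hdrop1, hc, hc2]
            simp only [pvBGo, if_true]
            congr 2
          · -- illegal escape: both return res
            have hget : ¬ (l[i+1]? = some '@') := by
              rw [List.getElem?_eq_getElem hi1]
              simpa using hc2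
            simp only [hget, if_false]
            rw [hdrop, hdrop1, hc]
            simp [pvBGo, hc2]
      · -- ordinary character
        simp only [hc, ne_eq, not_false_eq_true, true_or, if_true]
        rw [ih l (i+1) (res ++ [String.ofList [l[i]]]) (by omega), hdrop]
        simp [pvBGo, hc]
    · have hle : l.length ≤ i := by omega
      rw [pvALoop, List.drop_eq_nil_of_le hle]
      simp [pvBGo, hi]

-- ===== VERDICT (by name: the statement is the Claim_ definition above) =====
theorem to_char_list_spec : Claim_equal_to_char_list := by
  intro word _ _
  unfold Spec_to_char_list to_char_list to_char_list_alt
  simpa using pvALoop_eq_pvBGo word.toList.length word.toList 0 [] (by omega)
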